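-- pv_equiv track=rewrite | github.com/samsungapore/Another-SDSE | script_analyser.py | right_len
-- ===== SOURCE A (Python) =====
-- def count_rem(w_line, i):
--     if w_line.find('>') != -1:
--         count = 1
--     else:
--         count = 0
--     while i < len(w_line) and w_line[i] != '>':
--         count += 1
--         i += 1
--     return count, i + 1
--
-- def cleaned_text(w_line):
--     i = 0
--     new_line = list()
--     while i < len(w_line):
--         while i < len(w_line) and w_line[i] == '<':
--             var, i = count_rem(w_line, i)
--         if i < len(w_line) and w_line[i] != '<':
--             new_line.append(w_line[i])
--         i += 1
--     return ''.join(new_line)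
--
-- def right_len(line):
--     # remove <CLT> from line
--     line = cleaned_text(line)
--
--     # if single line, directly check len
--     if line.find('\n') == -1:
--         if len(line) > 64:
--             return False
--         else:
--             return True
--     # else, split into an array and check each cell of array
--     else:
--         tab = line.split('\n')
--         for single_line in tab:
--             if len(single_line) > 64:
--                 return False
--             else:
--                 return True
-- ===== SOURCE B (Python) =====
-- def right_len(line):
--     # One linear pass: count characters kept outside <...> tags; A only ever
--     # judges the first newline-separated segment, so decide at the first
--     # un-tagged newline (or at end of string).
--     n = 0
--     inside = False
--     for ch in line:
--         if inside:
--             inside = ch != '>'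
--         elif ch == '<':
--             inside = True
--         elif ch == '\n':
--             return n <= 64
--         else:
--             n += 1
--     return n <= 64
-- ===== Notes on version B (the rewrite author's own statement) =====
-- stated objective: simpler
-- what changed: Replaces the nested while-loops with helper calls plus a find/split/for epilogue by a single linear scan with a boolean inside-tag flag that counts kept characters and decides at the first un-tagged newline (A always decides on the first segment only), building no intermediate string.
import Mathlib
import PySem

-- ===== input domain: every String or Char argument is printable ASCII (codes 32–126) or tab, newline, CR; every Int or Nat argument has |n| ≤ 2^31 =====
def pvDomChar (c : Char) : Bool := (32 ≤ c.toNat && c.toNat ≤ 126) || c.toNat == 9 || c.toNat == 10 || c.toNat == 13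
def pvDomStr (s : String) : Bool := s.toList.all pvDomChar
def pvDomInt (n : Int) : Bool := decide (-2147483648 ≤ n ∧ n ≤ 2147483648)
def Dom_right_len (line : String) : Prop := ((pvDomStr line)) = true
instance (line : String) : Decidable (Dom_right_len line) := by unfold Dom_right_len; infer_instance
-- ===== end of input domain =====

-- B replaces A's nested while-loops + find/split/for epilogue by one linear scan with an
-- inside-tag flag, deciding at the first un-tagged newline (objective: simpler).

-- ===== PORT A =====
-- count_rem's while loop (count is carried but unused by the callers' control flow)
def countRemLoop (w : List Char) (count : Int) (i : Nat) : Int × Nat :=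
  if h : i < w.length then
    if w[i] ≠ '>' then countRemLoop w (count + 1) (i + 1) else (count, i + 1)
  else (count, i + 1)
termination_by w.length - i

-- count_rem(w_line, i)
def countRem (w : List Char) (i : Nat) : Int × Nat :=
  countRemLoop w (if PySem.Chars.find w ['>'] ≠ -1 then 1 else 0) i

theorem countRemLoop_lt (w : List Char) (count : Int) (i : Nat) :
    i < (countRemLoop w count i).2 := by
  unfold countRemLoop
  split
  · split
    · exact Nat.lt_trans (Nat.lt_succ_self i) (countRemLoop_lt w (count + 1) (i + 1))
    · exact Nat.lt_succ_self i
  · exact Nat.lt_succ_self i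
termination_by w.length - i

-- the inner "while i < len and w_line[i] == '<'" loop of cleaned_text
def cleanInner (w : List Char) (i : Nat) : Nat :=
  if h : i < w.length then
    if w[i] = '<' then cleanInner w (countRem w i).2 else i
  else i
termination_by w.length - i
decreasing_by
  simp only [countRem]
  have := countRemLoop_lt w (if PySem.Chars.find w ['>'] ≠ -1 then 1 else 0) i
  omega

theorem cleanInner_le (w : List Char) (i : Nat) : i ≤ cleanInner w i := by
  rw [cleanInner]
  split
  · split
    · have h1 := countRemLoop_lt w (if PySem.Chars.find w ['>'] ≠ -1 then 1 else 0) i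
      have h2 := cleanInner_le w (countRem w i).2
      simp only [countRem] at *
      omega
    · exact Nat.le_refl i
  · exact Nat.le_refl i
termination_by w.length - i
decreasing_by
  simp only [countRem]
  have := countRemLoop_lt w (if PySem.Chars.find w ['>'] ≠ -1 then 1 else 0) i
  omega

-- the outer while loop of cleaned_text, accumulating new_line (the two lets of the Python
-- body — j after the inner loop, the appended accumulator — are inlined)
def cleanLoop (w : List Char) (acc : List Char) (i : Nat) : List Char :=
  if h : i < w.length then
    cleanLoop w
      (if h2 : cleanInner w i < w.length then
         (if w[cleanInner w i] ≠ '<' then acc ++ [w[cleanInner w i]] else acc)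
       else acc)
      (cleanInner w i + 1)
  else acc
termination_by w.length - i
decreasing_by
  have := cleanInner_le w i
  omega

-- the for loop of right_len's else-branch: returns on the FIRST element; the [] case is
-- unreachable (str.split never returns an empty list; Python would fall off returning None)
def forLoop : List (List Char) → Bool
  | [] => false
  | s :: _ => if s.length > 64 then false else true

def right_len (line : String) : Bool :=
  let cleaned := cleanLoop line.toList [] 0
  if PySem.Chars.find cleaned ['\n'] = -1 then
    if cleaned.length > 64 then false else true
  else
    forLoop (PySem.Chars.splitOn cleaned ['\n'])

-- ===== PORT B =====
-- Source B's single for-loop: n = kept-character count, inside = inside-tag flag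
def altLoop (w : List Char) (n : Nat) (inside : Bool) : Bool :=
  match w with
  | [] => n ≤ 64
  | c :: rest =>
    if inside then altLoop rest n (c != '>')
    else if c = '<' then altLoop rest n true
    else if c = '\n' then n ≤ 64
    else altLoop rest (n + 1) false

def right_len_alt (line : String) : Bool :=
  altLoop line.toList 0 false

-- ===== PRECONDITION & SPEC =====
def Spec_right_len (line : String) (out : Bool) : Prop := out = right_len_alt line
instance (line : String) (out : Bool) : Decidable (Spec_right_len line out) := by unfold Spec_right_len; infer_instance

-- ===== CLAIM (what is proved, stated in full; the proofs are below) =====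
def Claim_equal_right_len : Prop := ∀ (line : String), Dom_right_len line → Spec_right_len line (right_len line)

-- ===== LEMMAS AND PROOFS =====

-- reference tag-stripper: state 'true' = inside a tag
def strip : Bool → List Char → List Char
  | _, [] => []
  | true, c :: r => strip (c != '>') r
  | false, c :: r => if c = '<' then strip true r else c :: strip false r

theorem strip_countRemLoop (w : List Char) (count : Int) (i : Nat) :
    strip true (w.drop i) = strip false (w.drop (countRemLoop w count i).2) := by
  rw [countRemLoop]
  split
  · rename_i h
    rw [List.drop_eq_getElem_cons h]
    split
    · rename_i hne
      have hb : (w[i] != '>') = true := by simpa using hne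
      simp only [strip, hb]
      exact strip_countRemLoop w (count + 1) (i + 1)
    · rename_i hgt
      simp at hgt
      simp [strip, hgt]
  · rename_i h
    rw [List.drop_eq_nil_of_le (by omega), List.drop_eq_nil_of_le (by omega)]
    rfl
termination_by w.length - i

theorem strip_cleanInner (w : List Char) (i : Nat) :
    strip false (w.drop i) = strip false (w.drop (cleanInner w i)) := by
  conv_rhs => rw [cleanInner]
  split
  · rename_i h
    split
    · rename_i hlt
      have hstep : countRemLoop w (if PySem.Chars.find w ['>'] ≠ -1 then 1 else 0) i
          = countRemLoop w ((if PySem.Chars.find w ['>'] ≠ -1 then 1 else 0) + 1) (i + 1) := by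
        conv_lhs => rw [countRemLoop]
        simp [h, hlt]
      have h1 : strip false (w.drop i) = strip false (w.drop (countRem w i).2) := by
        rw [List.drop_eq_getElem_cons h]
        simp only [countRem, hstep]
        simp [strip, hlt]
        exact strip_countRemLoop w _ (i + 1)
      rw [h1]
      exact strip_cleanInner w (countRem w i).2
    · rfl
  · rfl
termination_by w.length - i
decreasing_by
  simp only [countRem]
  have := countRemLoop_lt w (if PySem.Chars.find w ['>'] ≠ -1 then 1 else 0) i
  omega

theorem cleanInner_stop (w : List Char) (i : Nat) :
    w[cleanInner w i]? ≠ some '<' := by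
  rw [cleanInner]
  split
  · split
    · exact cleanInner_stop w (countRem w i).2
    · rename_i hi hne
      rw [List.getElem?_eq_getElem hi]
      simpa using hne
  · rename_i hi
    rw [List.getElem?_eq_none (by omega)]
    simp
termination_by w.length - i
decreasing_by
  simp only [countRem]
  have := countRemLoop_lt w (if PySem.Chars.find w ['>'] ≠ -1 then 1 else 0) i
  omega

theorem cleanLoop_eq_strip (w acc : List Char) (i : Nat) :
    cleanLoop w acc i = acc ++ strip false (w.drop i) := by
  rw [cleanLoop]
  split
  · rename_i h
    rw [strip_cleanInner w i]
    by_cases h2 : cleanInner w i < w.length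
    · have hne : w[cleanInner w i] ≠ '<' := by
        have h3 := cleanInner_stop w i
        rw [List.getElem?_eq_getElem h2] at h3
        simpa using h3
      rw [dif_pos h2, if_pos hne]
      rw [cleanLoop_eq_strip w (acc ++ [w[cleanInner w i]]) (cleanInner w i + 1)]
      rw [List.drop_eq_getElem_cons h2]
      simp [strip, hne]
    · rw [dif_neg h2]
      rw [cleanLoop_eq_strip w acc (cleanInner w i + 1)]
      rw [List.drop_eq_nil_of_le (by omega), List.drop_eq_nil_of_le (by omega)]
  · rename_i h
    rw [List.drop_eq_nil_of_le (by omega)]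
    simp [strip]
termination_by w.length - i
decreasing_by all_goals
  have := cleanInner_le w i
  omega

theorem altLoop_eq (w : List Char) (n : Nat) (b : Bool) :
    altLoop w n b = decide (n + (List.takeWhile (fun c => c != '\n') (strip b w)).length ≤ 64) := by
  induction w generalizing n b with
  | nil => cases b <;> simp [altLoop, strip]
  | cons c rest ih =>
    cases b with
    | true =>
      show altLoop rest n (c != '>') = _
      rw [ih]
      rfl
    | false =>
      by_cases h1 : c = '<'
      · subst h1
        show altLoop rest n true = _
        rw [ih]
        rfl
      · by_cases h2 : c = '\n'
        · subst h2
          simp [altLoop, strip, h1]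
        · have : altLoop (c :: rest) n false = altLoop rest (n + 1) false := by
            simp [altLoop, h1, h2]
          rw [this, ih]
          have hs : strip false (c :: rest) = c :: strip false rest := by
            simp [strip, h1]
          rw [hs, List.takeWhile_cons]
          simp only [show (c != '\n') = true from by simpa using h2, if_true, List.length_cons]
          rw [decide_eq_decide]
          omega

theorem splitOn_head (fuel : Nat) (l cur : List Char) (acc : List (List Char))
    (h : l.length < fuel) :
    ∃ rest, PySem.Chars.splitOn.go ['\n'] fuel l cur acc =
      acc.reverse ++ (cur.reverse ++ l.takeWhile (fun c => c != '\n')) :: rest := by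
  induction fuel generalizing l cur acc with
  | zero => omega
  | succ fuel ih =>
    match l with
    | [] => exact ⟨[], by simp [PySem.Chars.splitOn.go]⟩
    | c :: l' =>
      by_cases hc : c = '\n'
      · subst hc
        obtain ⟨r, hr⟩ := ih l' [] (cur.reverse :: acc) (by simp at h ⊢; omega)
        refine ⟨l'.takeWhile (fun c => c != '\n') :: r, ?_⟩
        rw [show PySem.Chars.splitOn.go ['\n'] (fuel+1) ('\n'::l') cur acc
            = PySem.Chars.splitOn.go ['\n'] fuel l' [] (cur.reverse :: acc) from by
          simp [PySem.Chars.splitOn.go, List.isPrefixOf]]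
        rw [hr]
        simp
      · obtain ⟨r, hr⟩ := ih l' (c :: cur) acc (by simp at h ⊢; omega)
        refine ⟨r, ?_⟩
        rw [show PySem.Chars.splitOn.go ['\n'] (fuel+1) (c::l') cur acc
            = PySem.Chars.splitOn.go ['\n'] fuel l' (c :: cur) acc from by
          simp only [PySem.Chars.splitOn.go, List.isPrefixOf]
          simp
          intro e
          exact absurd e.symm hc]
        rw [hr]
        simp [hc]

-- ===== VERDICT (by name: the statement is the Claim_ definition above) =====
theorem right_len_spec : Claim_equal_right_len := by
  unfold Claim_equal_right_len
  intro line _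
  unfold Spec_right_len right_len right_len_alt
  rw [altLoop_eq]
  have hcs : cleanLoop line.toList [] 0 = strip false line.toList := by
    rw [cleanLoop_eq_strip]; simp
  rw [hcs]
  simp only [Nat.zero_add]
  split
  · rename_i hfind
    have hinf : ¬ ['\n'] <:+: strip false line.toList :=
      (PySem.Chars.find_eq_neg_one_iff _ _).mp hfind
    have hmem : '\n' ∉ strip false line.toList := by
      intro hm
      obtain ⟨s, t, he⟩ := List.append_of_mem hm
      exact hinf ⟨s, t, by simp [he]⟩
    have htw : (strip false line.toList).takeWhile (fun c => c != '\n')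
        = strip false line.toList := by
      apply List.takeWhile_eq_self_iff.mpr
      intro a ha
      have : a ≠ '\n' := fun e => hmem (e ▸ ha)
      simpa using this
    rw [htw]
    by_cases hlen : (strip false line.toList).length ≤ 64
    · rw [if_neg (by omega), decide_eq_true hlen]
    · rw [if_pos (by omega), eq_comm, decide_eq_false hlen]
  · obtain ⟨r, hr⟩ := splitOn_head ((strip false line.toList).length + 1)
      (strip false line.toList) [] [] (by omega)
    show forLoop (PySem.Chars.splitOn (strip false line.toList) ['\n']) = _
    rw [show PySem.Chars.splitOn (strip false line.toList) ['\n']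
        = PySem.Chars.splitOn.go ['\n'] ((strip false line.toList).length + 1)
            (strip false line.toList) [] [] from rfl]
    rw [hr]
    simp only [List.reverse_nil, List.nil_append, forLoop]
    by_cases hlen : ((strip false line.toList).takeWhile (fun c => c != '\n')).length ≤ 64
    · rw [if_neg (by omega), decide_eq_true hlen]
    · rw [if_pos (by omega), eq_comm, decide_eq_false hlen]
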